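-- pv_equiv track=rewrite | github.com/akmalfayyazi/1st-semester | dasprog/labs if task/lsm2.py | last_man_standing
-- ===== SOURCE A (Python) =====
-- def last_man_standing(n, c):
--     # Buat array untuk menentukan pemenang pada setiap jumlah bola
--     winning_position = [False] * (n + 1)
--
--     # Iterasi untuk menentukan apakah pada jumlah bola tertentu, pemain yang memulai bisa menang
--     for i in range(1, n + 1):
--         if i >= 1 and not winning_position[i - 1]:
--             winning_position[i] = True
--         elif i >= 2 and not winning_position[i - 2]:
--             winning_position[i] = True
--         elif i >= 5 and not winning_position[i - 5]:
--             winning_position[i] = True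
--
--     # Jika c = 1, berarti Lala yang mulai
--     if c == 1:
--         return "Lala" if winning_position[n] else "Lili"
--     else:
--         return "Lili" if winning_position[n] else "Lala"
-- ===== SOURCE B (Python) =====
-- def last_man_standing(n, c):
--     # Closed form: with moves {1, 2, 5} the starting player wins iff n % 3 != 0.
--     starter_wins = n % 3 != 0
--     return "Lala" if starter_wins == (c == 1) else "Lili"
-- ===== Notes on version B (the rewrite author's own statement) =====
-- stated objective: faster
-- what changed: replaces the O(n) win/loss DP table over moves {1,2,5} with the closed form 'starter wins iff n % 3 != 0'
import Mathlib
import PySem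

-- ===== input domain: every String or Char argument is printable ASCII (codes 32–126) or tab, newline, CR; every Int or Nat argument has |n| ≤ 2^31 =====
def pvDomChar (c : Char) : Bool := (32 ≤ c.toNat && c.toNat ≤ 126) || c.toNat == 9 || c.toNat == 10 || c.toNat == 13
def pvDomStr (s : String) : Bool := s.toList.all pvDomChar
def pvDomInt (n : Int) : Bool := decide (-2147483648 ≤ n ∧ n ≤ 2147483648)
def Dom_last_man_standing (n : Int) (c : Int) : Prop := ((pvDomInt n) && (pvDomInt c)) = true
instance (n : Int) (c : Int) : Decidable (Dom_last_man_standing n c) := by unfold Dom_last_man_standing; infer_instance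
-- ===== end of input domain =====

-- B replaces A's O(n) win/loss DP over moves {1,2,5} by the closed form "starter wins iff n % 3 ≠ 0".

-- ===== PORT A =====
-- the body of A's for-loop; the table is an Array (Python's list: O(1) get/set). Every
-- index reached under a true guard is nonnegative and in range (i runs over 1..n), so the
-- `.toNat`/`.getD false`/setIfInBounds totalisations are never exercised on inputs in Pre_.
def lmsStep (wp : Array Bool) (i : Int) : Array Bool :=
  if 1 ≤ i ∧ ¬ (wp[(i - 1).toNat]?.getD false) then wp.setIfInBounds i.toNat true
  else if 2 ≤ i ∧ ¬ (wp[(i - 2).toNat]?.getD false) then wp.setIfInBounds i.toNat true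
  else if 5 ≤ i ∧ ¬ (wp[(i - 5).toNat]?.getD false) then wp.setIfInBounds i.toNat true
  else wp

def last_man_standing (n : Int) (c : Int) : String :=
  let wp := (PySem.List.pyRange 1 (n + 1) 1).foldl lmsStep (Array.replicate (n + 1).toNat false)
  if c = 1 then (if wp[n.toNat]?.getD false then "Lala" else "Lili")
  else (if wp[n.toNat]?.getD false then "Lili" else "Lala")

-- ===== PORT B =====
def last_man_standing_alt (n : Int) (c : Int) : String :=
  let starterWins : Bool := decide (PySem.Int.mod n 3 ≠ 0)
  if starterWins = decide (c = 1) then "Lala" else "Lili"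

-- ===== PRECONDITION & SPEC =====
-- Pre_ excludes exactly n < 0, where A raises IndexError (empty DP table, winning_position[n] read).
def Pre_last_man_standing (n : Int) (c : Int) : Prop := 0 ≤ n
instance (n : Int) (c : Int) : Decidable (Pre_last_man_standing n c) := by unfold Pre_last_man_standing; infer_instance
def pvWitness_last_man_standing : Int × Int := (4, 1)

def Spec_last_man_standing (n : Int) (c : Int) (out : String) : Prop := out = last_man_standing_alt n c
instance (n : Int) (c : Int) (out : String) : Decidable (Spec_last_man_standing n c out) := by unfold Spec_last_man_standing; infer_instance

-- ===== CLAIM (what is proved, stated in full; the proofs are below) =====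
def Claim_equal_last_man_standing : Prop := ∀ (n : Int) (c : Int), Dom_last_man_standing n c → Pre_last_man_standing n c → Spec_last_man_standing n c (last_man_standing n c)

-- ===== LEMMAS AND PROOFS =====

-- the DP table after processing moves 1..k: entry j is true iff 1 ≤ j ≤ k and j % 3 ≠ 0
def lmsTab (m k : Nat) : List Bool :=
  (List.range m).map (fun j => decide (1 ≤ j ∧ j ≤ k ∧ j % 3 ≠ 0))

theorem lmsTab_get (m k j : Nat) (h : j < m) :
    (lmsTab m k)[j]'(by simpa [lmsTab] using h) = decide (1 ≤ j ∧ j ≤ k ∧ j % 3 ≠ 0) := by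
  simp [lmsTab]

theorem pyGet_lmsTab (m k : Nat) (j : Int) (h0 : 0 ≤ j) (h1 : j < m) :
    ((lmsTab m k).toArray[j.toNat]?).getD false
      = decide (1 ≤ j.toNat ∧ j.toNat ≤ k ∧ j.toNat % 3 ≠ 0) := by
  rw [List.getElem?_toArray]
  have hj : j.toNat < m := by omega
  rw [List.getElem?_eq_getElem (by simpa [lmsTab] using hj)]
  simp [lmsTab_get m k j.toNat hj]

theorem lmsTab_zero (m : Nat) : lmsTab m 0 = List.replicate m false := by
  apply List.ext_getElem
  · simp [lmsTab]
  · intro j h1 h2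
    simp [lmsTab] at h1 ⊢
    omega

theorem lmsTab_succ_of_mod (m k : Nat) (h : (k + 1) % 3 = 0) :
    lmsTab m (k + 1) = lmsTab m k := by
  apply List.ext_getElem
  · simp [lmsTab]
  · intro j h1 h2
    have hjm : j < m := by simpa [lmsTab] using h1
    rw [lmsTab_get m (k+1) j hjm, lmsTab_get m k j hjm]
    simp only [decide_eq_decide]
    omega

theorem lmsStep_lmsTab (m k : Nat) (hk : k + 1 < m) :
    lmsStep (lmsTab m k).toArray ((k : Int) + 1) = (lmsTab m (k + 1)).toArray := by
  have hsetL : ((k + 1) % 3 ≠ 0) →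
      (lmsTab m k).set (k + 1) true = lmsTab m (k + 1) := by
    intro hb
    apply List.ext_getElem
    · simp [lmsTab]
    · intro j hj1 hj2
      have hjm : j < m := by simpa [lmsTab] using hj2
      rw [List.getElem_set]
      split
      · next h => subst h; rw [lmsTab_get m (k+1) (k+1) hjm]; simp; omega
      · next h =>
        rw [lmsTab_get m k j (by simpa [lmsTab] using hj1), lmsTab_get m (k+1) j hjm]
        simp only [decide_eq_decide]
        omega
  have hset : ((k + 1) % 3 ≠ 0) →
      (lmsTab m k).toArray.setIfInBounds (k + 1) true = (lmsTab m (k + 1)).toArray := by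
    intro hb
    rw [← hsetL hb]
    simp
  have htoNat : ((k : Int) + 1).toNat = k + 1 := by omega
  have hg1 : ((lmsTab m k).toArray[((k : Int) + 1 - 1).toNat]?).getD false
      = decide (1 ≤ k ∧ k ≤ k ∧ k % 3 ≠ 0) := by
    have := pyGet_lmsTab m k ((k : Int) + 1 - 1) (by omega) (by omega)
    simpa using this
  rcases Nat.lt_or_ge k 1 with hk1 | hk1
  · -- k = 0 : i = 1, first branch fires (wp[0] = false)
    interval_cases k
    unfold lmsStep
    rw [if_pos]
    · exact hset (by omega)
    · refine ⟨by omega, ?_⟩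
      rw [hg1]; simp
  · have hg2 : ((lmsTab m k).toArray[((k : Int) + 1 - 2).toNat]?).getD false
        = decide (1 ≤ k - 1 ∧ k - 1 ≤ k ∧ (k - 1) % 3 ≠ 0) := by
      have := pyGet_lmsTab m k ((k : Int) + 1 - 2) (by omega) (by omega)
      have ht : ((k : Int) + 1 - 2).toNat = k - 1 := by omega
      rw [ht] at this ⊢; exact this
    rcases Nat.lt_or_ge k 4 with hk4 | hk4
    · -- 1 ≤ k ≤ 3 : i ∈ {2,3,4}, third-branch guard 5 ≤ i is false
      unfold lmsStep
      rw [hg1, hg2, htoNat]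
      interval_cases k
      · -- i = 2 : second branch fires
        rw [if_neg (by simp), if_pos (by refine ⟨by omega, ?_⟩; simp)]
        exact hset (by omega)
      · -- i = 3 : losing position, nothing fires
        rw [if_neg (by simp), if_neg (by simp), if_neg (by simp)]
        exact congrArg List.toArray (lmsTab_succ_of_mod m 2 (by omega)).symm
      · -- i = 4 : first branch fires
        rw [if_pos (by refine ⟨by omega, ?_⟩; simp)]
        exact hset (by omega)
    · -- k ≥ 4 : all three guards are live; case on (k+1) % 3
      have hg5 : ((lmsTab m k).toArray[((k : Int) + 1 - 5).toNat]?).getD false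
          = decide (1 ≤ k - 4 ∧ k - 4 ≤ k ∧ (k - 4) % 3 ≠ 0) := by
        have := pyGet_lmsTab m k ((k : Int) + 1 - 5) (by omega) (by omega)
        have ht : ((k : Int) + 1 - 5).toNat = k - 4 := by omega
        rw [ht] at this ⊢; exact this
      unfold lmsStep
      rw [hg1, hg2, hg5, htoNat]
      have h3 : (k + 1) % 3 = 0 ∨ (k + 1) % 3 = 1 ∨ (k + 1) % 3 = 2 := by omega
      rcases h3 with h3 | h3 | h3
      · -- (k+1) % 3 = 0 : no branch fires, the table is unchanged
        rw [if_neg (by simp; omega), if_neg (by simp; omega), if_neg (by simp; omega)]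
        exact congrArg List.toArray (lmsTab_succ_of_mod m k h3).symm
      · -- (k+1) % 3 = 1 : wp[k] is a losing position, first branch fires
        rw [if_pos (by refine ⟨by omega, ?_⟩; simp; omega)]
        exact hset (by omega)
      · -- (k+1) % 3 = 2 : second branch fires
        rw [if_neg (by simp; omega), if_pos (by refine ⟨by omega, ?_⟩; simp; omega)]
        exact hset (by omega)

theorem lms_fold (m k : Nat) (hk : k < m) :
    (PySem.List.pyRange 1 ((k : Int) + 1) 1).foldl lmsStep (Array.replicate m false) = (lmsTab m k).toArray := by
  induction k with
  | zero =>
    rw [PySem.List.pyRange_one_eq_nil (by omega)]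
    simp [lmsTab_zero]
  | succ k ih =>
    push_cast
    rw [PySem.List.pyRange_one_succ_right (by omega), List.foldl_append]
    have := ih (by omega)
    push_cast at this
    rw [this]
    simpa using lmsStep_lmsTab m k hk

theorem lms_table_value (n : Int) (hn : 0 ≤ n) :
    (((PySem.List.pyRange 1 (n + 1) 1).foldl lmsStep (Array.replicate (n + 1).toNat false))[n.toNat]?).getD false
      = decide (PySem.Int.mod n 3 ≠ 0) := by
  have hcast : (n.toNat : Int) = n := by omega
  have hm : (n + 1).toNat = n.toNat + 1 := by omega
  rw [hm, show (n + 1) = ((n.toNat : Int) + 1) by omega,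
      lms_fold (n.toNat + 1) n.toNat (by omega)]
  have := pyGet_lmsTab (n.toNat + 1) n.toNat n hn (by omega)
  rw [this]
  rw [show (3 : Int) = ((3 : Nat) : Int) from rfl, ← hcast, PySem.Int.mod_natCast]
  simp only [decide_eq_decide]
  constructor
  · rintro ⟨_, _, h⟩; exact_mod_cast fun hc => h (by exact_mod_cast hc)
  · intro h
    refine ⟨by omega, le_refl _, fun hc => h (by exact_mod_cast hc)⟩

-- ===== VERDICT (by name: the statement is the Claim_ definition above) =====
theorem last_man_standing_spec : Claim_equal_last_man_standing := by
  intro n c _ hpre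
  simp only [Spec_last_man_standing, last_man_standing, last_man_standing_alt]
  rw [lms_table_value n hpre]
  by_cases hc : c = 1 <;> by_cases hw : PySem.Int.mod n 3 ≠ 0 <;>
    simp [hc, hw]
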